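-- pv_equiv track=rewrite | github.com/lesliewu0506/Helix-Hunters | src/brute_force/generate_all_folding_structures.py | _check_valid_folding
-- ===== SOURCE A (Python) =====
-- direction_map = {
--     0 : (0, 0),
--     1 : (1, 0),
--     -1 : (-1, 0),
--     2: (0, 1),
--     -2: (0, -1)
-- }
--
-- def _check_valid_folding(folding: list[int]) -> bool:
--     """
--     Helper function that checks a folding sequence.
--     If folding is not valid, returns False.
--     Else return True.
--     """
--     coordinates: set[tuple[int, int]] = set()
--     x_current: int = 0
--     y_current: int = 0
--
--     # Add coordinates
--     for direction in folding:
--         if (x_current, y_current) in coordinates: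
--             return False
--         coordinates.add((x_current, y_current))
--
--         # Update positions
--         dx, dy = direction_map[direction]
--         x_current += dx
--         y_current += dy
--     return True
-- ===== SOURCE B (Python) =====
-- direction_map = {
--     0 : (0, 0),
--     1 : (1, 0),
--     -1 : (-1, 0),
--     2: (0, 1),
--     -2: (0, -1)
-- }
--
-- def _check_valid_folding(folding: list[int]) -> bool:
--     # Sort-based duplicate detection instead of an incremental hash set:
--     # collect the n pre-move positions, sort them lexicographically, and a
--     # repeat exists iff two equal positions are now adjacent.
--     coords: list[tuple[int, int]] = []
--     x, y = 0, 0
--     for direction in folding: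
--         coords.append((x, y))
--         dx, dy = direction_map[direction]
--         x, y = x + dx, y + dy
--     coords.sort()
--     return all(p != q for p, q in zip(coords, coords[1:]))
-- ===== Notes on version B (the rewrite author's own statement) =====
-- stated objective: alternative
-- what changed: B abandons A's incremental visited-set with in-loop membership test and early return: it records the n pre-move positions, sorts them lexicographically, and detects a revisit as two equal adjacent entries of the sorted list (sort-then-scan instead of hash-set lookup).
-- outside the precondition, e.g. on _check_valid_folding([0, 0, 99]): A returns False, B raises KeyError
import Mathlib
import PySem

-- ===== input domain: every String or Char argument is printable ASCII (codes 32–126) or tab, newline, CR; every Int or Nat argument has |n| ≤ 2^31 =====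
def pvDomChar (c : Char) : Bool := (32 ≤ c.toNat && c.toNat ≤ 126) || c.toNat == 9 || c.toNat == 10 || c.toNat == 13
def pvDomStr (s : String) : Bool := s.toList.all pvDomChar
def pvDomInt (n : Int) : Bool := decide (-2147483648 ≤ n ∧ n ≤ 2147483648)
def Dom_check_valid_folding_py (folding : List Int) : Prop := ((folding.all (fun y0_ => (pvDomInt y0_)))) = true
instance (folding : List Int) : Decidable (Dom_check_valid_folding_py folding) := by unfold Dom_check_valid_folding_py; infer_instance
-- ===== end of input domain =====

-- B replaces A's incremental visited-set (membership test + early return) by sort-based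
-- duplicate detection: sort the n pre-move positions and look for equal adjacent entries
-- (objective: alternative algorithm, similar cost).

-- direction_map[d]; a key outside {0,1,-1,2,-2} raises KeyError in Python — such inputs are
-- excluded by Pre_; the default (0, 0) here is never reached inside Pre_.
def pvDirMap (d : Int) : Int × Int :=
  if d = 0 then (0, 0)
  else if d = 1 then (1, 0)
  else if d = -1 then (-1, 0)
  else if d = 2 then (0, 1)
  else if d = -2 then (0, -1)
  else (0, 0)

-- ===== PORT A =====
-- the for-loop of A: state = (coordinates set, x_current, y_current), early return False
def pvGoA (coords : PySem.Set (Int × Int)) (x y : Int) : List Int → Bool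
  | [] => true
  | d :: rest =>
    if PySem.Set.contains coords (x, y) then false
    else
      let coords' := PySem.Set.add coords (x, y)
      let dxy := pvDirMap d
      pvGoA coords' (x + dxy.1) (y + dxy.2) rest

def check_valid_folding_py (folding : List Int) : Bool :=
  pvGoA PySem.Set.empty 0 0 folding

-- ===== PORT B =====
-- the for-loop of B: appends the pre-move (x, y) for every element, then moves
def pvCoordsB (x y : Int) : List Int → List (Int × Int)
  | [] => []
  | d :: rest =>
    let dxy := pvDirMap d
    (x, y) :: pvCoordsB (x + dxy.1) (y + dxy.2) rest

-- coords.sort() on 2-tuples = sorted with the lexicographic tuple key, i.e. sorted2 fst snd;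
-- zip(coords, coords[1:]) is List.zip with drop 1 (exact: start index 1 ≥ 0); all(p != q …)
def check_valid_folding_py_alt (folding : List Int) : Bool :=
  let coords := pvCoordsB 0 0 folding
  let s := PySem.List.sorted2 coords Prod.fst Prod.snd
  (s.zip (s.drop 1)).all (fun pq => pq.1 != pq.2)

-- ===== PRECONDITION & SPEC =====
-- Pre_ excludes inputs with a direction outside direction_map's keys: on those Python A either
-- raises KeyError or (if a coordinate repeats before the bad key) returns False, while B
-- reads every key before its final check and so always raises KeyError there.
def Pre_check_valid_folding_py (folding : List Int) : Prop :=
  ∀ d ∈ folding, d = 0 ∨ d = 1 ∨ d = -1 ∨ d = 2 ∨ d = -2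
instance (folding : List Int) : Decidable (Pre_check_valid_folding_py folding) := by
  unfold Pre_check_valid_folding_py; infer_instance

def pvWitness_check_valid_folding_py : List Int := [1, 2, -1]

def Spec_check_valid_folding_py (folding : List Int) (out : Bool) : Prop := out = check_valid_folding_py_alt folding
instance (folding : List Int) (out : Bool) : Decidable (Spec_check_valid_folding_py folding out) := by unfold Spec_check_valid_folding_py; infer_instance

-- ===== CLAIM (what is proved, stated in full; the proofs are below) =====
def Claim_equal_check_valid_folding_py : Prop := ∀ (folding : List Int), Dom_check_valid_folding_py folding → Pre_check_valid_folding_py folding → Spec_check_valid_folding_py folding (check_valid_folding_py folding)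

-- ===== LEMMAS AND PROOFS =====

-- the lexicographic (Python tuple) order on pairs of ints
def pvLex (a b : Int × Int) : Prop := a.1 < b.1 ∨ (a.1 = b.1 ∧ a.2 ≤ b.2)

lemma pvLex_trans {a b c : Int × Int} (hab : pvLex a b) (hbc : pvLex b c) : pvLex a c := by
  obtain ⟨a1, a2⟩ := a; obtain ⟨b1, b2⟩ := b; obtain ⟨c1, c2⟩ := c
  unfold pvLex at *; dsimp at *; omega

lemma pvLex_antisymm {a b : Int × Int} (hab : pvLex a b) (hba : pvLex b a) : a = b := by
  obtain ⟨a1, a2⟩ := a; obtain ⟨b1, b2⟩ := b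
  unfold pvLex at *; dsimp at *
  have : a1 = b1 ∧ a2 = b2 := by omega
  simp [this.1, this.2]

-- A's loop returns true iff B's coordinate list is duplicate-free and disjoint from
-- the already-visited set.
lemma pvGoA_iff (l : List Int) : ∀ (s : PySem.Set (Int × Int)) (x y : Int),
    pvGoA s x y l = true ↔ ((pvCoordsB x y l).Nodup ∧ ∀ p ∈ pvCoordsB x y l, p ∉ s) := by
  induction l with
  | nil => intro s x y; simp [pvGoA, pvCoordsB]
  | cons d rest ih =>
    intro s x y
    simp only [pvGoA, pvCoordsB]
    by_cases h : (x, y) ∈ s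
    · rw [if_pos (by rw [PySem.Set.contains_iff]; exact h)]
      simp [h]
    · rw [if_neg (by rw [PySem.Set.contains_iff]; exact h)]
      simp only [ih, List.nodup_cons, List.mem_cons, PySem.Set.mem_add]
      constructor
      · rintro ⟨hn, hd⟩
        refine ⟨⟨fun hm => (hd _ hm) (Or.inr rfl), hn⟩, fun p hp => ?_⟩
        rcases hp with rfl | hp
        · exact h
        · exact fun hps => (hd p hp) (Or.inl hps)
      · rintro ⟨⟨hxy, hn⟩, hd⟩
        refine ⟨hn, fun p hp hps => ?_⟩
        rcases hps with hps | rfl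
        · exact hd p (Or.inr hp) hps
        · exact hxy hp

-- sorted2's comparator decides pvLex: true means strict lex-below, false means lex-above-or-equal
lemma pvCmp_true {a b : Int × Int}
    (h : (decide (a.1 < b.1) || (!decide (b.1 < a.1) && decide (a.2 < b.2))) = true) :
    pvLex a b := by
  unfold pvLex; simp only [Bool.or_eq_true, Bool.and_eq_true, Bool.not_eq_true',
    decide_eq_true_eq, decide_eq_false_iff_not] at h; omega

lemma pvCmp_false {a b : Int × Int}
    (h : (decide (a.1 < b.1) || (!decide (b.1 < a.1) && decide (a.2 < b.2))) = false) :
    pvLex b a := by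
  unfold pvLex; simp only [Bool.or_eq_false_iff, Bool.and_eq_false_iff, Bool.not_eq_false',
    decide_eq_true_eq, decide_eq_false_iff_not] at h; omega

-- insertBy with sorted2's comparator preserves pairwise pvLex
lemma pvInsertBy_pairwise (x : Int × Int) (ys : List (Int × Int))
    (h : ys.Pairwise pvLex) :
    (PySem.List.insertBy
      (fun a b => decide (a.1 < b.1) || (!decide (b.1 < a.1) && decide (a.2 < b.2))) x ys).Pairwise pvLex := by
  induction ys with
  | nil => simp [PySem.List.insertBy]
  | cons y ys ih =>
    rw [List.pairwise_cons] at h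
    obtain ⟨hy, hys⟩ := h
    unfold PySem.List.insertBy
    split
    · rename_i hcmp
      refine List.pairwise_cons.mpr ⟨?_, List.pairwise_cons.mpr ⟨hy, hys⟩⟩
      intro z hz
      rcases List.mem_cons.mp hz with rfl | hz
      · exact pvCmp_true hcmp
      · exact pvLex_trans (pvCmp_true hcmp) (hy z hz)
    · rename_i hcmp
      refine List.pairwise_cons.mpr ⟨?_, ih hys⟩
      intro z hz
      have := (PySem.List.insertBy_perm _ x ys).mem_iff.mp hz
      rcases List.mem_cons.mp this with rfl | hz'
      · exact pvCmp_false (Bool.of_not_eq_true hcmp)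
      · exact hy z hz'

-- sorted2 fst snd produces a pairwise-lex list
lemma pvSorted2_pairwise (xs : List (Int × Int)) :
    (PySem.List.sorted2 xs Prod.fst Prod.snd).Pairwise pvLex := by
  show (xs.foldl (fun acc x => PySem.List.insertBy _ x acc) []).Pairwise pvLex
  induction xs using List.reverseRecOn with
  | nil => simp
  | append_singleton xs x ih =>
    rw [List.foldl_append, List.foldl_cons, List.foldl_nil]
    exact pvInsertBy_pairwise x _ ih

-- the B-side adjacent-distinct check equals IsChain (· ≠ ·)
lemma pvAllZip_iff (s : List (Int × Int)) :
    ((s.zip (s.drop 1)).all (fun pq => pq.1 != pq.2) = true) ↔ s.IsChain (· ≠ ·) := by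
  induction s with
  | nil => simp
  | cons a t ih =>
    cases t with
    | nil => simp
    | cons b u =>
      simp only [List.drop_succ_cons, List.drop_zero, List.zip_cons_cons, List.all_cons,
        Bool.and_eq_true, bne_iff_ne, List.isChain_cons_cons] at *
      rw [ih]

-- in a pairwise-lex list, adjacent-distinct is equivalent to nodup
lemma pvChain_iff_nodup (s : List (Int × Int)) (hs : s.Pairwise pvLex) :
    s.IsChain (· ≠ ·) ↔ s.Nodup := by
  constructor
  · intro hch
    have hlt : s.IsChain (fun a b => pvLex a b ∧ a ≠ b) :=
      List.isChain_iff_getElem.mpr (fun i hi =>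
        ⟨List.isChain_iff_getElem.mp hs.isChain i hi,
         List.isChain_iff_getElem.mp hch i hi⟩)
    have hpw : s.Pairwise (fun a b => pvLex a b ∧ a ≠ b) := by
      have htr : Trans (fun a b : Int × Int => pvLex a b ∧ a ≠ b)
          (fun a b : Int × Int => pvLex a b ∧ a ≠ b)
          (fun a b : Int × Int => pvLex a b ∧ a ≠ b) := by
        constructor
        intro a b c hab hbc
        refine ⟨pvLex_trans hab.1 hbc.1, ?_⟩
        rintro rfl
        exact hab.2 (pvLex_antisymm hab.1 hbc.1)
      exact (@List.isChain_iff_pairwise _ _ _ htr).mp hlt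
    exact List.Pairwise.imp (fun h => h.2) hpw
  · intro hnd
    exact hnd.isChain

-- ===== VERDICT (by name: the statement is the Claim_ definition above) =====
theorem check_valid_folding_py_spec : Claim_equal_check_valid_folding_py := by
  intro folding _ _
  unfold Spec_check_valid_folding_py check_valid_folding_py check_valid_folding_py_alt
  have key := pvGoA_iff folding ([] : PySem.Set (Int × Int)) 0 0
  set c := pvCoordsB 0 0 folding with hc
  set s := PySem.List.sorted2 c Prod.fst Prod.snd with hsdef
  have hperm : s.Perm c := PySem.List.sorted2_perm c Prod.fst Prod.snd false
  have hpair := pvSorted2_pairwise c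
  have hiff : ((s.zip (s.drop 1)).all (fun pq => pq.1 != pq.2) = true) ↔ c.Nodup := by
    rw [pvAllZip_iff, pvChain_iff_nodup s hpair, hperm.nodup_iff]
  by_cases h : c.Nodup
  · have h1 : pvGoA ([] : PySem.Set (Int × Int)) 0 0 folding = true :=
      key.mpr ⟨h, by simp⟩
    simp only [PySem.Set.empty] at h1 ⊢
    rw [h1, (hiff.mpr h)]
  · have h1 : pvGoA ([] : PySem.Set (Int × Int)) 0 0 folding = false := by
      cases hb : pvGoA ([] : PySem.Set (Int × Int)) 0 0 folding
      · rfl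
      · exact absurd (key.mp hb).1 h
    have h2 : ((s.zip (s.drop 1)).all (fun pq => pq.1 != pq.2)) = false := by
      cases hb : ((s.zip (s.drop 1)).all (fun pq => pq.1 != pq.2))
      · rfl
      · exact absurd (hiff.mp hb) h
    simp only [PySem.Set.empty] at h1 ⊢
    rw [h1, h2]
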